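-- pv_equiv track=rewrite | github.com/PostHog/posthog | ee/clickhouse/queries/paths/paths.py | validate_results
-- ===== SOURCE A (Python) =====
-- from collections import defaultdict
--
-- def validate_results(results):
--     # Query guarantees results list to be:
--     # 1. Directed, Acyclic Tree where each node has only 1 child
--     # 2. All start nodes beginning with 1_
--
--     seen = set()  # source nodes that've been traversed
--     edges = defaultdict(list)
--     validated_results = []
--     starting_nodes_stack = []
--
--     for result in results:
--         edges[result[0]].append(result[1])
--         if result[0].startswith("1_"):
--             # All nodes with 1_ are valid starting nodes
--             starting_nodes_stack.append(result[0])
--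
--     while starting_nodes_stack:
--         current_node = starting_nodes_stack.pop()
--         seen.add(current_node)
--
--         for node in edges[current_node]:
--             if node not in seen:
--                 starting_nodes_stack.append(node)
--
--     for result in results:
--         if result[0] in seen:
--             validated_results.append(result)
--
--     return validated_results
-- ===== SOURCE B (Python) =====
-- def validate_results(results):
--     # Nodes reachable from the 1_ start nodes, computed by fixpoint
--     # saturation over the edge list (no stack, no adjacency dict).
--     seen = {src for src, _dst in results if src.startswith("1_")}
--     changed = True
--     while changed:
--         changed = False
--         for src, dst in results:
--             if src in seen and dst not in seen:
--                 seen.add(dst)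
--                 changed = True
--     return [result for result in results if result[0] in seen]
-- ===== Notes on version B (the rewrite author's own statement) =====
-- stated objective: simpler
-- what changed: Replaced the adjacency defaultdict plus explicit DFS stack with a Bellman-Ford-style saturation: start from the set of 1_ sources and repeatedly sweep the edge list adding reachable targets until no sweep changes the set; the final filter by membership is unchanged.
import Mathlib
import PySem

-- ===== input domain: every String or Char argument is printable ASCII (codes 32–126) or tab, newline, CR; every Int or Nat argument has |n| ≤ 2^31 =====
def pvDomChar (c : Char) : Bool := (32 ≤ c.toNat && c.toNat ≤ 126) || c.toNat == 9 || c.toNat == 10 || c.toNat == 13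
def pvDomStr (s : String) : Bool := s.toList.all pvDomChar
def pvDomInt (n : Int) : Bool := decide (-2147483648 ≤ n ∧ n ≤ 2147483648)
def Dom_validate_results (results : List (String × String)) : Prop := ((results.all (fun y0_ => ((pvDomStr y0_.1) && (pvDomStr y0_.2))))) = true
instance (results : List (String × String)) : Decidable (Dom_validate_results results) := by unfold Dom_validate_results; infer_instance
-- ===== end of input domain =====

-- B replaces A's adjacency-dict + explicit DFS stack with a simpler saturation sweep
-- over the edge list (objective: simpler); same return value on every input.

-- ===== PORT A =====
-- one pass building the defaultdict adjacency and the list of 1_ start nodes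
-- (the stack is held top-first: Python's append/pop at the right end become cons/head here)
def vrBuild (results : List (String × String)) :
    PySem.Dict String (List String) × List String :=
  results.foldl
    (fun st r =>
      (st.1.modify r.1 [] (fun l => l ++ [r.2]),
       if PySem.Str.startswith r.1 "1_" then r.1 :: st.2 else st.2))
    (PySem.Dict.empty, [])

-- the 'while starting_nodes_stack' loop; fuel only makes it total (vrFuel is proved
-- sufficient below, so the fuel-exhausted branch is never taken)
def vrLoop (edges : PySem.Dict String (List String)) :
    Nat → PySem.Set String → List String → PySem.Set String
  | 0, seen, _ => seen
  | _ + 1, seen, [] => seen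
  | fuel + 1, seen, u :: rest =>
      let seen' := PySem.Set.add seen u
      let stack' := (edges.getD u []).foldl
        (fun st c => if PySem.Set.contains seen' c then st else c :: st) rest
      vrLoop edges fuel seen' stack'

def vrFuel (results : List (String × String)) : Nat :=
  (results.length + 1) * (2 * results.length + 1) + 1

def validate_results (results : List (String × String)) : List (String × String) :=
  let b := vrBuild results
  let seen := vrLoop b.1 (vrFuel results) PySem.Set.empty b.2
  results.foldl (fun acc r => if PySem.Set.contains seen r.1 then acc ++ [r] else acc) []

-- ===== PORT B =====
-- one sweep of the edge list: grow seen by targets of already-seen sources, flag changes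
def vrPass (results : List (String × String)) (seen : PySem.Set String) :
    PySem.Set String × Bool :=
  results.foldl
    (fun st p =>
      if PySem.Set.contains st.1 p.1 && !PySem.Set.contains st.1 p.2
      then (PySem.Set.add st.1 p.2, true) else st)
    (seen, false)

-- the 'while changed' loop; fuel only makes it total (results.length + 2 is proved sufficient)
def vrSat (results : List (String × String)) : Nat → PySem.Set String → PySem.Set String
  | 0, seen => seen
  | fuel + 1, seen =>
      let st := vrPass results seen
      if st.2 then vrSat results fuel st.1 else st.1

def vrStartsB (results : List (String × String)) : PySem.Set String :=
  PySem.Set.ofList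
    ((results.filter (fun p => PySem.Str.startswith p.1 "1_")).map (fun p => p.1))

def validate_results_alt (results : List (String × String)) : List (String × String) :=
  let seen := vrSat results (results.length + 2) (vrStartsB results)
  results.filter (fun r => PySem.Set.contains seen r.1)

-- ===== PRECONDITION & SPEC =====
def Spec_validate_results (results : List (String × String)) (out : List (String × String)) : Prop := out = validate_results_alt results
instance (results : List (String × String)) (out : List (String × String)) : Decidable (Spec_validate_results results out) := by unfold Spec_validate_results; infer_instance

-- ===== CLAIM (what is proved, stated in full; the proofs are below) =====
def Claim_equal_validate_results : Prop := ∀ (results : List (String × String)), Dom_validate_results results → Spec_validate_results results (validate_results results)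

-- ===== LEMMAS AND PROOFS =====

-- closure property of a set of nodes with respect to the edge list
def vrClosed (results : List (String × String)) (T : List String) : Prop :=
  ∀ p ∈ results, p.1 ∈ T → p.2 ∈ T

-- the two components of A's build pass, separately
theorem vrBuild_spec (l : List (String × String))
    (d : PySem.Dict String (List String)) (s : List String) :
    l.foldl
      (fun st r =>
        (st.1.modify r.1 [] (fun ll => ll ++ [r.2]),
         if PySem.Str.startswith r.1 "1_" then r.1 :: st.2 else st.2)) (d, s)
    = (l.foldl (fun d p => d.modify p.1 [] (fun ll => ll ++ [p.2])) d,
       l.foldl (fun s p => if PySem.Str.startswith p.1 "1_" then p.1 :: s else s) s) := by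
  induction l generalizing d s with
  | nil => rfl
  | cons p l ih => simp only [List.foldl_cons]; rw [ih]

theorem vrChildren (results : List (String × String)) (a : String) :
    (vrBuild results).1.getD a []
      = (results.filter (fun p => p.1 == a)).map (fun p => p.2) := by
  unfold vrBuild
  rw [vrBuild_spec]
  simpa using PySem.Dict.getD_foldl_modify_append results PySem.Dict.empty a

theorem vrMem_children (results : List (String × String)) (a c : String) :
    c ∈ (vrBuild results).1.getD a [] ↔ (a, c) ∈ results := by
  rw [vrChildren]
  simp only [List.mem_map, List.mem_filter, beq_iff_eq]
  constructor
  · rintro ⟨p, ⟨hp, h1⟩, h2⟩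
    have : p = (a, c) := by cases p; simp_all
    exact this ▸ hp
  · intro h
    exact ⟨(a, c), ⟨h, rfl⟩, rfl⟩

theorem vrChildren_len (results : List (String × String)) (a : String) :
    ((vrBuild results).1.getD a []).length ≤ results.length := by
  rw [vrChildren]
  calc ((results.filter (fun p => p.1 == a)).map (fun p => p.2)).length
      = (results.filter (fun p => p.1 == a)).length := List.length_map ..
    _ ≤ results.length := List.length_filter_le ..

theorem vrStack_foldl_mem (l : List (String × String)) (s : List String) (x : String) :
    x ∈ l.foldl (fun s p => if PySem.Str.startswith p.1 "1_" then p.1 :: s else s) s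
      ↔ x ∈ s ∨ ∃ p ∈ l, p.1 = x ∧ PySem.Str.startswith x "1_" = true := by
  induction l generalizing s with
  | nil => simp
  | cons p l ih =>
    simp only [List.foldl_cons]
    by_cases h : PySem.Str.startswith p.1 "1_" = true
    · rw [if_pos h, ih]
      constructor
      · rintro (hx | hx)
        · rcases List.mem_cons.mp hx with rfl | hx
          · exact Or.inr ⟨p, List.mem_cons_self .., rfl, h⟩
          · exact Or.inl hx
        · rcases hx with ⟨q, hq, h1, h2⟩
          exact Or.inr ⟨q, List.mem_cons_of_mem _ hq, h1, h2⟩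
      · rintro (hx | ⟨q, hq, h1, h2⟩)
        · exact Or.inl (List.mem_cons_of_mem _ hx)
        · rcases List.mem_cons.mp hq with rfl | hq
          · exact Or.inl (h1 ▸ List.mem_cons_self ..)
          · exact Or.inr ⟨q, hq, h1, h2⟩
    · rw [if_neg h, ih]
      constructor
      · rintro (hx | ⟨q, hq, h1, h2⟩)
        · exact Or.inl hx
        · exact Or.inr ⟨q, List.mem_cons_of_mem _ hq, h1, h2⟩
      · rintro (hx | ⟨q, hq, h1, h2⟩)
        · exact Or.inl hx
        · rcases List.mem_cons.mp hq with rfl | hq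
          · exact absurd (h1 ▸ h2) h
          · exact Or.inr ⟨q, hq, h1, h2⟩

theorem vrStack_mem (results : List (String × String)) (x : String) :
    x ∈ (vrBuild results).2
      ↔ ∃ p ∈ results, p.1 = x ∧ PySem.Str.startswith x "1_" = true := by
  unfold vrBuild
  rw [vrBuild_spec]
  simpa using vrStack_foldl_mem results [] x

theorem vrStack_len (l : List (String × String)) (s : List String) :
    (l.foldl (fun s p => if PySem.Str.startswith p.1 "1_" then p.1 :: s else s) s).length
      ≤ l.length + s.length := by
  induction l generalizing s with
  | nil => simp
  | cons p l ih =>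
    simp only [List.foldl_cons]
    by_cases h : PySem.Str.startswith p.1 "1_" = true
    · rw [if_pos h]
      have := ih (p.1 :: s)
      simp at this ⊢
      omega
    · rw [if_neg h]
      have := ih s
      simp at this ⊢
      omega

-- the push fold of A's loop, as reverse-filter-append
theorem vrPushFold_eq (s : PySem.Set String) (cs st0 : List String) :
    cs.foldl (fun st c => if PySem.Set.contains s c then st else c :: st) st0
      = (cs.filter (fun c => !PySem.Set.contains s c)).reverse ++ st0 := by
  induction cs generalizing st0 with
  | nil => simp
  | cons c cs ih =>
    simp only [List.foldl_cons, List.filter_cons]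
    cases h : PySem.Set.contains s c with
    | true =>
      rw [if_pos rfl, ih]
      simp
    | false =>
      rw [if_neg (by simp), ih]
      simp

-- soundness of A's loop: it never leaves a closed superset
theorem vrLoop_subset (edges : PySem.Dict String (List String)) (T : List String)
    (hT : ∀ a ∈ T, ∀ c ∈ edges.getD a [], c ∈ T) :
    ∀ (fuel : Nat) (seen : PySem.Set String) (stack : List String),
      (∀ x ∈ seen, x ∈ T) → (∀ x ∈ stack, x ∈ T) →
      ∀ x ∈ vrLoop edges fuel seen stack, x ∈ T := by
  intro fuel
  induction fuel with
  | zero => intro seen stack hs _ x hx; exact hs x hx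
  | succ fuel ih =>
    intro seen stack hs hst x hx
    cases stack with
    | nil => exact hs x hx
    | cons u rest =>
      have hu : u ∈ T := hst u (List.mem_cons_self ..)
      simp only [vrLoop, vrPushFold_eq] at hx
      refine ih _ _ ?_ ?_ x hx
      · intro y hy
        rcases (PySem.Set.mem_add _ _ _).mp hy with h | h
        · exact hs y h
        · exact h ▸ hu
      · intro y hy
        rcases List.mem_append.mp hy with h | h
        · have : y ∈ (edges.getD u []) := by
            have := List.mem_filter.mp (List.mem_reverse.mp h)
            exact this.1
          exact hT u hu y this
        · exact hst y (List.mem_cons_of_mem _ h)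

-- positional invariant: a seen node on the stack has all its children in seen or above it
def vrInvP (edges : PySem.Dict String (List String))
    (seen : PySem.Set String) (stack : List String) : Prop :=
  ∀ (i : Nat) (v : String), stack[i]? = some v → v ∈ seen →
    ∀ c ∈ edges.getD v [], c ∈ seen ∨ ∃ j < i, stack[j]? = some c

-- global invariant: children of any seen node are seen or on the stack
def vrInvG (edges : PySem.Dict String (List String))
    (seen : PySem.Set String) (stack : List String) : Prop :=
  ∀ v ∈ seen, ∀ c ∈ edges.getD v [], c ∈ seen ∨ c ∈ stack

theorem vrLoop_main (edges : PySem.Dict String (List String)) (E : Nat)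
    (hE : ∀ a, (edges.getD a []).length ≤ E) (allN : Finset String)
    (hcl : ∀ a c, c ∈ edges.getD a [] → c ∈ allN) :
    ∀ (fuel : Nat) (seen : PySem.Set String) (stack : List String),
      vrInvP edges seen stack → vrInvG edges seen stack →
      (∀ x ∈ stack, x ∈ allN) →
      (E + 1) * (allN \ seen.toFinset).card + stack.length < fuel →
      (∀ x ∈ seen, x ∈ vrLoop edges fuel seen stack) ∧
      (∀ x ∈ stack, x ∈ vrLoop edges fuel seen stack) ∧
      (∀ a ∈ vrLoop edges fuel seen stack, ∀ c ∈ edges.getD a [],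
        c ∈ vrLoop edges fuel seen stack) := by
  intro fuel
  induction fuel with
  | zero => intro seen stack _ _ _ h; exact absurd h (Nat.not_lt_zero _)
  | succ fuel ih =>
    intro seen stack hP hG hN hmu
    cases stack with
    | nil =>
      refine ⟨fun x hx => hx, by simp, ?_⟩
      intro a ha c hc
      rcases hG a ha c hc with h | h
      · exact h
      · exact absurd h (List.not_mem_nil)
    | cons u rest =>
      by_cases hu : u ∈ seen
      · -- popping an already-seen node: nothing is pushed
        have hadd : PySem.Set.add seen u = seen := PySem.Set.add_of_mem hu
        have hP0 : ∀ c ∈ edges.getD u [], c ∈ seen := by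
          intro c hc
          rcases hP 0 u (by simp) hu c hc with h | ⟨j, hj, _⟩
          · exact h
          · exact absurd hj (Nat.not_lt_zero _)
        have hfilter : (edges.getD u []).filter
            (fun c => !PySem.Set.contains (PySem.Set.add seen u) c) = [] := by
          rw [hadd]
          apply List.filter_eq_nil_iff.mpr
          intro c hc
          simp only [Bool.not_eq_true', Bool.not_eq_false]
          simp
          exact hP0 c hc
        have hstep : vrLoop edges (fuel+1) seen (u::rest) = vrLoop edges fuel seen rest := by
          simp only [vrLoop, vrPushFold_eq]
          rw [hfilter, hadd]
          simp
        rw [hstep]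
        have hP' : vrInvP edges seen rest := by
          intro i v hv hvs c hc
          rcases hP (i+1) v (by simpa using hv) hvs c hc with h | ⟨j, hj, hj2⟩
          · exact Or.inl h
          · cases j with
            | zero =>
              have hcu : u = c := by simpa using hj2
              exact Or.inl (hcu ▸ hu)
            | succ j => exact Or.inr ⟨j, by omega, by simpa using hj2⟩
        have hG' : vrInvG edges seen rest := by
          intro v hv c hc
          rcases hG v hv c hc with h | h
          · exact Or.inl h
          · rcases List.mem_cons.mp h with rfl | h'
            · exact Or.inl hu
            · exact Or.inr h'
        have hN' : ∀ x ∈ rest, x ∈ allN := fun x hx => hN x (List.mem_cons_of_mem _ hx)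
        have hmu' : (E + 1) * (allN \ seen.toFinset).card + rest.length < fuel := by
          rw [List.length_cons] at hmu
          generalize (E + 1) * (allN \ seen.toFinset).card = K at hmu ⊢
          omega
        obtain ⟨m1, m2, m3⟩ := ih seen rest hP' hG' hN' hmu'
        refine ⟨m1, ?_, m3⟩
        intro x hx
        rcases List.mem_cons.mp hx with rfl | h'
        · exact m1 x hu
        · exact m2 x h'
      · -- popping an unseen node
        have hadd : PySem.Set.add seen u = seen ++ [u] := PySem.Set.add_of_not_mem hu
        set P := (edges.getD u []).filter
          (fun c => !PySem.Set.contains (PySem.Set.add seen u) c) with hPdef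
        have hstep : vrLoop edges (fuel+1) seen (u::rest)
            = vrLoop edges fuel (PySem.Set.add seen u) (P.reverse ++ rest) := by
          simp only [vrLoop, vrPushFold_eq]
          rw [hPdef]
        have hPmem : ∀ c, c ∈ P ↔ (c ∈ edges.getD u [] ∧ c ∉ PySem.Set.add seen u) := by
          intro c
          rw [hPdef, List.mem_filter]
          constructor
          · rintro ⟨h1, h2⟩
            refine ⟨h1, fun hm => ?_⟩
            rw [(PySem.Set.contains_iff _ _).mpr hm] at h2
            simp at h2
          · rintro ⟨h1, h2⟩
            refine ⟨h1, ?_⟩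
            cases hcc : PySem.Set.contains (PySem.Set.add seen u) c with
            | true => exact absurd ((PySem.Set.contains_iff _ _).mp hcc) h2
            | false => simp [hcc]
        have hchild : ∀ c ∈ edges.getD u [], c ∈ PySem.Set.add seen u ∨ c ∈ P := by
          intro c hc
          by_cases hm : c ∈ PySem.Set.add seen u
          · exact Or.inl hm
          · exact Or.inr ((hPmem c).mpr ⟨hc, hm⟩)
        have hP' : vrInvP edges (PySem.Set.add seen u) (P.reverse ++ rest) := by
          intro i v hv hvs c hc
          by_cases hi : i < P.reverse.length
          · exfalso
            rw [List.getElem?_append_left hi] at hv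
            have hvP : v ∈ P.reverse := List.mem_of_getElem? hv
            exact ((hPmem v).mp (List.mem_reverse.mp hvP)).2 hvs
          · push_neg at hi
            have hv' : rest[i - P.reverse.length]? = some v := by
              rw [List.getElem?_append_right hi] at hv
              exact hv
            by_cases hvseen : v ∈ seen
            · have hvold : (u :: rest)[(i - P.reverse.length) + 1]? = some v := by
                simpa using hv'
              rcases hP ((i - P.reverse.length) + 1) v hvold hvseen c hc with h | ⟨j, hj, hj2⟩
              · exact Or.inl ((PySem.Set.mem_add _ _ _).mpr (Or.inl h))
              · cases j with
                | zero =>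
                  have hcu : u = c := by simpa using hj2
                  exact Or.inl ((PySem.Set.mem_add _ _ _).mpr (Or.inr hcu.symm))
                | succ j =>
                  have hjr : rest[j]? = some c := by simpa using hj2
                  refine Or.inr ⟨j + P.reverse.length, by omega, ?_⟩
                  rw [List.getElem?_append_right (by omega : P.reverse.length ≤ j + P.reverse.length)]
                  simpa using hjr
            · have hvu : v = u := by
                rcases (PySem.Set.mem_add _ _ _).mp hvs with h | h
                · exact absurd h hvseen
                · exact h
              subst hvu
              rcases hchild c hc with h | h
              · exact Or.inl h
              · obtain ⟨j, hj1, hj2⟩ := List.getElem_of_mem (List.mem_reverse.mpr h)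
                refine Or.inr ⟨j, by omega, ?_⟩
                rw [List.getElem?_append_left hj1]
                rw [List.getElem?_eq_getElem hj1]
                exact congrArg some hj2
        have hG' : vrInvG edges (PySem.Set.add seen u) (P.reverse ++ rest) := by
          intro v hvs c hc
          rcases (PySem.Set.mem_add _ _ _).mp hvs with hvseen | hvu
          · rcases hG v hvseen c hc with h | h
            · exact Or.inl ((PySem.Set.mem_add _ _ _).mpr (Or.inl h))
            · rcases List.mem_cons.mp h with rfl | h'
              · exact Or.inl ((PySem.Set.mem_add _ _ _).mpr (Or.inr rfl))
              · exact Or.inr (List.mem_append.mpr (Or.inr h'))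
          · subst hvu
            rcases hchild c hc with h | h
            · exact Or.inl h
            · exact Or.inr (List.mem_append.mpr (Or.inl (List.mem_reverse.mpr h)))
        have hN' : ∀ x ∈ P.reverse ++ rest, x ∈ allN := by
          intro x hx
          rcases List.mem_append.mp hx with h | h
          · exact hcl u x ((hPmem x).mp (List.mem_reverse.mp h)).1
          · exact hN x (List.mem_cons_of_mem _ h)
        have hufin : u ∈ allN \ seen.toFinset :=
          Finset.mem_sdiff.mpr ⟨hN u (List.mem_cons_self ..),
            fun hm => hu (List.mem_toFinset.mp hm)⟩
        have hcard : (allN \ (PySem.Set.add seen u).toFinset).card + 1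
            = (allN \ seen.toFinset).card := by
          rw [hadd]
          have hins : (seen ++ [u]).toFinset = insert u seen.toFinset := by
            rw [List.toFinset_append]
            simp [Finset.union_comm]
          rw [hins, Finset.sdiff_insert]
          exact Finset.card_erase_add_one hufin
        have hPlen : P.length ≤ E := le_trans (List.length_filter_le _ _) (hE u)
        have hmu' : (E + 1) * (allN \ (PySem.Set.add seen u).toFinset).card
            + (P.reverse ++ rest).length < fuel := by
          have h1 : (allN \ seen.toFinset).card
              = (allN \ (PySem.Set.add seen u).toFinset).card + 1 := hcard.symm
          rw [h1] at hmu
          have hexp : (E + 1) * ((allN \ (PySem.Set.add seen u).toFinset).card + 1)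
              = (E + 1) * (allN \ (PySem.Set.add seen u).toFinset).card + (E + 1) := by ring
          rw [hexp] at hmu
          rw [List.length_append, List.length_reverse, List.length_cons] at *
          generalize (E + 1) * (allN \ (PySem.Set.add seen u).toFinset).card = K at hmu ⊢
          omega
        obtain ⟨m1, m2, m3⟩ := ih _ _ hP' hG' hN' hmu'
        rw [hstep]
        refine ⟨fun x hx => m1 x ((PySem.Set.mem_add _ _ _).mpr (Or.inl hx)), ?_, m3⟩
        intro x hx
        rcases List.mem_cons.mp hx with rfl | h'
        · exact m1 x ((PySem.Set.mem_add _ _ _).mpr (Or.inr rfl))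
        · exact m2 x (List.mem_append.mpr (Or.inr h'))

-- characterization of B's one sweep
theorem vrPass_mono (l : List (String × String)) :
    ∀ (s : PySem.Set String) (b : Bool) (x : String), x ∈ s →
    x ∈ (l.foldl (fun st p =>
      if PySem.Set.contains st.1 p.1 && !PySem.Set.contains st.1 p.2
      then (PySem.Set.add st.1 p.2, true) else st) (s, b)).1 := by
  induction l with
  | nil => intro s b x hx; exact hx
  | cons p l ih =>
    intro s b x hx
    simp only [List.foldl_cons]
    by_cases hc : (PySem.Set.contains s p.1 && !PySem.Set.contains s p.2) = true
    · rw [if_pos hc]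
      exact ih _ _ x ((PySem.Set.mem_add _ _ _).mpr (Or.inl hx))
    · rw [if_neg hc]
      exact ih _ _ x hx

theorem vrPass_targets (l : List (String × String)) :
    ∀ (s : PySem.Set String) (b : Bool) (x : String),
    x ∈ (l.foldl (fun st p =>
      if PySem.Set.contains st.1 p.1 && !PySem.Set.contains st.1 p.2
      then (PySem.Set.add st.1 p.2, true) else st) (s, b)).1 →
    x ∈ s ∨ x ∈ l.map Prod.snd := by
  induction l with
  | nil => intro s b x hx; exact Or.inl hx
  | cons p l ih =>
    intro s b x hx
    simp only [List.foldl_cons] at hx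
    by_cases hc : (PySem.Set.contains s p.1 && !PySem.Set.contains s p.2) = true
    · rw [if_pos hc] at hx
      rcases ih _ _ x hx with h | h
      · rcases (PySem.Set.mem_add _ _ _).mp h with h' | h'
        · exact Or.inl h'
        · exact Or.inr (by simp [h'])
      · exact Or.inr (by simp [List.mem_map] at h ⊢; tauto)
    · rw [if_neg hc] at hx
      rcases ih _ _ x hx with h | h
      · exact Or.inl h
      · exact Or.inr (by simp [List.mem_map] at h ⊢; tauto)

theorem vrPass_sound (l : List (String × String)) (T : List String)
    (hT : ∀ p ∈ l, p.1 ∈ T → p.2 ∈ T) :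
    ∀ (s : PySem.Set String) (b : Bool), (∀ x ∈ s, x ∈ T) →
    ∀ x ∈ (l.foldl (fun st p =>
      if PySem.Set.contains st.1 p.1 && !PySem.Set.contains st.1 p.2
      then (PySem.Set.add st.1 p.2, true) else st) (s, b)).1, x ∈ T := by
  induction l with
  | nil => intro s b hs x hx; exact hs x hx
  | cons p l ih =>
    intro s b hs x hx
    simp only [List.foldl_cons] at hx
    have hTl : ∀ q ∈ l, q.1 ∈ T → q.2 ∈ T := fun q hq => hT q (List.mem_cons_of_mem _ hq)
    by_cases hc : (PySem.Set.contains s p.1 && !PySem.Set.contains s p.2) = true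
    · rw [if_pos hc] at hx
      refine ih hTl _ _ ?_ x hx
      intro y hy
      rcases (PySem.Set.mem_add _ _ _).mp hy with h | h
      · exact hs y h
      · have hp1 : p.1 ∈ s := (PySem.Set.contains_iff _ _).mp (by
          simp only [Bool.and_eq_true] at hc
          exact hc.1)
        exact h ▸ hT p (List.mem_cons_self ..) (hs p.1 hp1)
    · rw [if_neg hc] at hx
      exact ih hTl _ _ hs x hx

theorem vrPass_flag (l : List (String × String)) :
    ∀ (s : PySem.Set String),
    (l.foldl (fun st p =>
      if PySem.Set.contains st.1 p.1 && !PySem.Set.contains st.1 p.2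
      then (PySem.Set.add st.1 p.2, true) else st) (s, true)).2 = true := by
  induction l with
  | nil => intro s; rfl
  | cons p l ih =>
    intro s
    simp only [List.foldl_cons]
    cases hc : PySem.Set.contains s p.1 && !PySem.Set.contains s p.2 with
    | true => rw [if_pos rfl]; exact ih _
    | false => rw [if_neg (by simp)]; exact ih _

theorem vrPass_unchanged (l : List (String × String)) :
    ∀ (s : PySem.Set String),
    (l.foldl (fun st p =>
      if PySem.Set.contains st.1 p.1 && !PySem.Set.contains st.1 p.2
      then (PySem.Set.add st.1 p.2, true) else st) (s, false)).2 = false →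
    (l.foldl (fun st p =>
      if PySem.Set.contains st.1 p.1 && !PySem.Set.contains st.1 p.2
      then (PySem.Set.add st.1 p.2, true) else st) (s, false)).1 = s ∧
    ∀ p ∈ l, p.1 ∈ s → p.2 ∈ s := by
  induction l with
  | nil => intro s _; exact ⟨rfl, by simp⟩
  | cons p l ih =>
    intro s hfl
    simp only [List.foldl_cons] at hfl ⊢
    by_cases hc : (PySem.Set.contains s p.1 && !PySem.Set.contains s p.2) = true
    · rw [if_pos hc] at hfl
      exact absurd hfl (by rw [vrPass_flag]; simp)
    · rw [if_neg hc] at hfl ⊢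
      rcases ih s hfl with ⟨h1, h2⟩
      refine ⟨h1, ?_⟩
      intro q hq hq1
      rcases List.mem_cons.mp hq with rfl | hq'
      · have hcf : (PySem.Set.contains s q.1 && !PySem.Set.contains s q.2) = false := by
          simpa using hc
        rcases Bool.and_eq_false_iff.mp hcf with h | h
        · exfalso
          have hct := (PySem.Set.contains_iff _ _).mpr hq1
          rw [h] at hct
          simp at hct
        · exact (PySem.Set.contains_iff _ _).mp (by simpa using h)
      · exact h2 q hq' hq1

theorem vrPass_changed (l : List (String × String)) :
    ∀ (s : PySem.Set String),
    (l.foldl (fun st p =>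
      if PySem.Set.contains st.1 p.1 && !PySem.Set.contains st.1 p.2
      then (PySem.Set.add st.1 p.2, true) else st) (s, false)).2 = true →
    ∃ x, x ∈ (l.foldl (fun st p =>
      if PySem.Set.contains st.1 p.1 && !PySem.Set.contains st.1 p.2
      then (PySem.Set.add st.1 p.2, true) else st) (s, false)).1 ∧ x ∉ s := by
  induction l with
  | nil => intro s h; exact absurd h (by simp)
  | cons p l ih =>
    intro s hfl
    simp only [List.foldl_cons] at hfl ⊢
    by_cases hc : (PySem.Set.contains s p.1 && !PySem.Set.contains s p.2) = true
    · rw [if_pos hc] at hfl ⊢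
      refine ⟨p.2, ?_, ?_⟩
      · exact vrPass_mono l _ _ p.2 ((PySem.Set.mem_add _ _ _).mpr (Or.inr rfl))
      · simp only [Bool.and_eq_true, Bool.not_eq_true'] at hc
        intro hmem
        have hct := (PySem.Set.contains_iff _ _).mpr hmem
        rw [hc.2] at hct
        simp at hct
    · rw [if_neg hc] at hfl ⊢
      exact ih s hfl

theorem vrSat_subset (results : List (String × String)) (T : List String)
    (hT : vrClosed results T) :
    ∀ (fuel : Nat) (s : PySem.Set String), (∀ x ∈ s, x ∈ T) →
    ∀ x ∈ vrSat results fuel s, x ∈ T := by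
  intro fuel
  induction fuel with
  | zero => intro s hs x hx; exact hs x hx
  | succ fuel ih =>
    intro s hs x hx
    simp only [vrSat] at hx
    have hsub : ∀ y ∈ (vrPass results s).1, y ∈ T :=
      vrPass_sound results T hT s false hs
    by_cases h : (vrPass results s).2 = true
    · rw [if_pos h] at hx; exact ih _ hsub x hx
    · rw [if_neg h] at hx; exact hsub x hx

theorem vrSat_main (results : List (String × String)) :
    ∀ (fuel : Nat) (s : PySem.Set String),
      ((results.map Prod.snd).toFinset \ s.toFinset).card < fuel →
      (∀ x ∈ s, x ∈ vrSat results fuel s) ∧ vrClosed results (vrSat results fuel s) := by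
  intro fuel
  induction fuel with
  | zero => intro s h; exact absurd h (by omega)
  | succ fuel ih =>
    intro s hcard
    simp only [vrSat]
    by_cases h : (vrPass results s).2 = true
    case neg =>
      rw [if_neg h]
      have h : (vrPass results s).2 = false := by simpa using h
      rcases vrPass_unchanged results s h with ⟨h1, h2⟩
      rw [show (vrPass results s).1 = s from h1]
      exact ⟨fun x hx => hx, h2⟩
    case pos =>
      rw [if_pos h]
      have hmono : ∀ x ∈ s, x ∈ (vrPass results s).1 := fun x hx =>
        vrPass_mono results s false x hx
      rcases vrPass_changed results s h with ⟨x, hx1, hx2⟩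
      have hxt : x ∈ results.map Prod.snd := by
        rcases vrPass_targets results s false x hx1 with h' | h'
        · exact absurd h' hx2
        · exact h'
      have hlt : ((results.map Prod.snd).toFinset \ (vrPass results s).1.toFinset).card
          < ((results.map Prod.snd).toFinset \ s.toFinset).card := by
        apply Finset.card_lt_card
        constructor
        · intro y hy
          simp only [Finset.mem_sdiff, List.mem_toFinset] at hy ⊢
          exact ⟨hy.1, fun hys => hy.2 (hmono y hys)⟩
        · intro hsub
          have hx' : x ∈ (results.map Prod.snd).toFinset \ s.toFinset := by
            simp only [Finset.mem_sdiff, List.mem_toFinset]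
            exact ⟨hxt, hx2⟩
          have := hsub hx'
          simp only [Finset.mem_sdiff, List.mem_toFinset] at this
          exact this.2 hx1
      rcases ih (vrPass results s).1 (by omega) with ⟨ih1, ih2⟩
      exact ⟨fun y hy => ih1 y (hmono y hy), ih2⟩

-- the two seen sets, named
def vrSeenA (results : List (String × String)) : PySem.Set String :=
  vrLoop (vrBuild results).1 (vrFuel results) PySem.Set.empty (vrBuild results).2

def vrSeenB (results : List (String × String)) : PySem.Set String :=
  vrSat results (results.length + 2) (vrStartsB results)

theorem vrStartsB_mem (results : List (String × String)) (x : String) :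
    x ∈ vrStartsB results
      ↔ ∃ p ∈ results, p.1 = x ∧ PySem.Str.startswith x "1_" = true := by
  unfold vrStartsB
  rw [PySem.Set.mem_ofList]
  simp only [List.mem_map, List.mem_filter]
  constructor
  · rintro ⟨p, ⟨hp, hs⟩, rfl⟩
    exact ⟨p, hp, rfl, hs⟩
  · rintro ⟨p, hp, rfl, hs⟩
    exact ⟨p, ⟨hp, hs⟩, rfl⟩

theorem vrSeenA_props (results : List (String × String)) :
    (∀ x ∈ (vrBuild results).2, x ∈ vrSeenA results) ∧
    vrClosed results (vrSeenA results) := by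
  have hmain := vrLoop_main (vrBuild results).1 results.length
    (fun a => vrChildren_len results a)
    ((results.map Prod.fst).toFinset ∪ (results.map Prod.snd).toFinset)
    (fun a c hc => by
      have : (a, c) ∈ results := (vrMem_children results a c).mp hc
      apply Finset.mem_union_right
      rw [List.mem_toFinset]
      exact List.mem_map.mpr ⟨(a, c), this, rfl⟩)
    (vrFuel results) PySem.Set.empty (vrBuild results).2
    (fun i v hv hvs => absurd hvs (List.not_mem_nil))
    (fun v hv => absurd hv (List.not_mem_nil))
    (fun x hx => by
      obtain ⟨p, hp, hpx, _⟩ := (vrStack_mem results x).mp hx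
      apply Finset.mem_union_left
      rw [List.mem_toFinset]
      exact List.mem_map.mpr ⟨p, hp, hpx⟩)
    (by
      have hC : (((results.map Prod.fst).toFinset ∪ (results.map Prod.snd).toFinset)
          \ (PySem.Set.empty : PySem.Set String).toFinset).card ≤ 2 * results.length := by
        calc (((results.map Prod.fst).toFinset ∪ (results.map Prod.snd).toFinset)
              \ (PySem.Set.empty : PySem.Set String).toFinset).card
            ≤ ((results.map Prod.fst).toFinset ∪ (results.map Prod.snd).toFinset).card :=
              Finset.card_le_card Finset.sdiff_subset
          _ ≤ (results.map Prod.fst).toFinset.card + (results.map Prod.snd).toFinset.card :=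
              Finset.card_union_le ..
          _ ≤ (results.map Prod.fst).length + (results.map Prod.snd).length :=
              Nat.add_le_add (List.toFinset_card_le _) (List.toFinset_card_le _)
          _ = 2 * results.length := by simp [List.length_map]; ring
      have hL : (vrBuild results).2.length ≤ results.length := by
        unfold vrBuild
        rw [vrBuild_spec]
        simpa using vrStack_len results []
      have hmul : (results.length + 1) *
          ((((results.map Prod.fst).toFinset ∪ (results.map Prod.snd).toFinset)
            \ (PySem.Set.empty : PySem.Set String).toFinset).card)
          ≤ (results.length + 1) * (2 * results.length) :=
        Nat.mul_le_mul_left _ hC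
      have hexp : (results.length + 1) * (2 * results.length + 1) + 1
          = (results.length + 1) * (2 * results.length) + results.length + 2 := by ring
      unfold vrFuel
      rw [hexp]
      generalize hK : (results.length + 1) *
          ((((results.map Prod.fst).toFinset ∪ (results.map Prod.snd).toFinset)
            \ (PySem.Set.empty : PySem.Set String).toFinset).card) = K at hmul ⊢
      generalize hM : (results.length + 1) * (2 * results.length) = M at hmul ⊢
      omega)
  refine ⟨hmain.2.1, ?_⟩
  intro p hp hp1
  exact hmain.2.2 p.1 hp1 p.2 ((vrMem_children results p.1 p.2).mpr (by simpa using hp))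

theorem vrSeenB_props (results : List (String × String)) :
    (∀ x ∈ vrStartsB results, x ∈ vrSeenB results) ∧
    vrClosed results (vrSeenB results) := by
  apply vrSat_main
  calc ((results.map Prod.snd).toFinset \ (vrStartsB results).toFinset).card
      ≤ (results.map Prod.snd).toFinset.card := Finset.card_le_card (Finset.sdiff_subset)
    _ ≤ (results.map Prod.snd).length := List.toFinset_card_le _
    _ = results.length := List.length_map ..
    _ < results.length + 2 := by omega

theorem vrSeen_iff (results : List (String × String)) (x : String) :
    x ∈ vrSeenA results ↔ x ∈ vrSeenB results := by
  constructor
  · intro hx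
    refine vrLoop_subset (vrBuild results).1 (vrSeenB results) ?_ (vrFuel results)
      PySem.Set.empty (vrBuild results).2 ?_ ?_ x hx
    · intro a ha c hc
      exact (vrSeenB_props results).2 (a, c) ((vrMem_children results a c).mp hc) ha
    · intro y hy
      exact absurd hy (List.not_mem_nil)
    · intro y hy
      apply (vrSeenB_props results).1
      exact (vrStartsB_mem results y).mpr ((vrStack_mem results y).mp hy)
  · intro hx
    refine vrSat_subset results (vrSeenA results) ?_ (results.length + 2)
      (vrStartsB results) ?_ x hx
    · exact (vrSeenA_props results).2
    · intro y hy
      apply (vrSeenA_props results).1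
      exact (vrStack_mem results y).mpr ((vrStartsB_mem results y).mp hy)

-- ===== VERDICT (by name: the statement is the Claim_ definition above) =====
theorem validate_results_spec : Claim_equal_validate_results := by
  intro results _
  unfold Spec_validate_results validate_results validate_results_alt
  rw [PySem.List.foldl_append_if_eq_filter]
  rw [List.nil_append]
  apply List.filter_congr
  intro r _
  show PySem.Set.contains (vrSeenA results) r.1 = PySem.Set.contains (vrSeenB results) r.1
  by_cases h : r.1 ∈ vrSeenA results
  · rw [(PySem.Set.contains_iff _ _).mpr h,
        (PySem.Set.contains_iff _ _).mpr ((vrSeen_iff results r.1).mp h)]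
  · have h' : r.1 ∉ vrSeenB results := fun hb => h ((vrSeen_iff results r.1).mpr hb)
    rw [Bool.eq_false_iff.mpr (fun hc => h ((PySem.Set.contains_iff _ _).mp hc)),
        Bool.eq_false_iff.mpr (fun hc => h' ((PySem.Set.contains_iff _ _).mp hc))]
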